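-- pv_equiv track=rewrite | github.com/shenfanjie5-bit/project-ult-assembly | scripts/production_daily_cycle_proof.py | _redact_postgres_uri
-- ===== SOURCE A (Python) =====
-- def _redact_postgres_uri(value: str) -> str:
--     prefixes = ("postgresql://", "postgres://", "postgresql+psycopg://")
--     redacted = value
--     for prefix in prefixes:
--         start = redacted.find(prefix)
--         while start != -1:
--             end = len(redacted)
--             for separator in (" ", "\n", "\r", "\t", '"', "'"):
--                 candidate = redacted.find(separator, start)
--                 if candidate != -1:
--                     end = min(end, candidate)
--             redacted = redacted[:start] + prefix + "<redacted>" + redacted[end:]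
--             start = redacted.find(prefix, start + len(prefix) + len("<redacted>"))
--     return redacted
-- ===== SOURCE B (Python) =====
-- # Single left-to-right scan: at each position either copy one character, or emit the
-- # matched prefix plus the redaction placeholder and skip the credential up to the next
-- # separator; one pass instead of the original's repeated find-and-rebuild passes.
--
-- _PREFIXES = ("postgresql+psycopg://", "postgresql://", "postgres://")
-- _SEPARATORS = ' \n\r\t"\''
--
--
-- def _redact_postgres_uri(value: str) -> str:
--     out = []
--     i = 0
--     n = len(value)
--     while i < n:
--         for prefix in _PREFIXES:
--             if value.startswith(prefix, i):
--                 out.append(prefix)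
--                 out.append("<redacted>")
--                 i += len(prefix)
--                 while i < n and value[i] not in _SEPARATORS:
--                     i += 1
--                 break
--         else:
--             out.append(value[i])
--             i += 1
--     return "".join(out)
-- ===== Notes on version B (the rewrite author's own statement) =====
-- stated objective: alternative
-- what changed: Replaces A's three sequential per-prefix passes, each repeatedly calling str.find and rebuilding the whole string per occurrence, with one left-to-right scan that at each position either copies a character or emits the matched prefix plus the redaction placeholder and skips the credential up to the next separator.
import Mathlib
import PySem

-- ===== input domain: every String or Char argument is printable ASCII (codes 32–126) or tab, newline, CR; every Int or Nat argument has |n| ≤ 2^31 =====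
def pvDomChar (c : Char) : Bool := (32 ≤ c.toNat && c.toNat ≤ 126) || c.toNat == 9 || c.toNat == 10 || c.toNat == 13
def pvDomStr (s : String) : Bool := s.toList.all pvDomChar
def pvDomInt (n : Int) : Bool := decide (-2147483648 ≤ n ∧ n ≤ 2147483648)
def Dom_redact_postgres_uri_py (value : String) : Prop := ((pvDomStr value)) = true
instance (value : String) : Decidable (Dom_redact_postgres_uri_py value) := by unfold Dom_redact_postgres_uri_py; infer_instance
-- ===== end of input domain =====

-- B replaces A's three sequential find-and-rebuild passes by one left-to-right scan (alternative algorithm, same output, proved below).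

-- ===== PORT A =====
-- three-pass find/replace, transliterated; loops ported on value.toList (PySem.Chars = the str ops)
def pvP1 : List Char := "postgresql://".toList
def pvP2 : List Char := "postgres://".toList
def pvP3 : List Char := "postgresql+psycopg://".toList
def pvRed : List Char := "<redacted>".toList
def pvSeps : List Char := [' ', '\n', '\r', '\t', '"', '\'']

-- the inner 'while start != -1' loop of A; fuel only makes the recursion total (proved sufficient below)
def pvLoopA (p : List Char) : Nat → List Char → Int → List Char
  | 0, red, _ => red
  | fuel + 1, red, start =>
    if start = -1 then red
    else
      let e := pvSeps.foldl (fun e sep =>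
          let cand := PySem.Chars.findFrom red [sep] start
          if cand ≠ -1 then min e cand else e) ((red.length : Int))
      let red' := PySem.Chars.slice red none (some start) ++ p ++ pvRed
                    ++ PySem.Chars.slice red (some e) none
      pvLoopA p fuel red' (PySem.Chars.findFrom red' p (start + (p.length : Int) + (pvRed.length : Int)))

def redact_postgres_uri_py (value : String) : String :=
  String.ofList ([pvP1, pvP2, pvP3].foldl
    (fun red p => pvLoopA p (red.length + 1) red (PySem.Chars.find red p)) value.toList)

-- ===== PORT B =====
-- single left-to-right scan (port of Source B): copy a char, or emit prefix ++ "<redacted>" and skip to the next separator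
-- termination helper for pvScan (cited in its decreasing_by)
theorem pvScan_dec (f : Char → Bool) (c : Char) (rest : List Char) (k : Nat) (hk : 0 < k) :
    (((c :: rest).drop k).dropWhile f).length < (c :: rest).length := by
  have h1 := List.length_dropWhile_le f ((c :: rest).drop k)
  have h2 : ((c :: rest).drop k).length = (c :: rest).length - k := List.length_drop ..
  simp only [List.length_cons] at *
  omega

def pvScan : List Char → List Char
  | [] => []
  | c :: rest =>
    if PySem.Chars.startswith (c :: rest) pvP3 then
      pvP3 ++ pvRed ++ pvScan (((c :: rest).drop pvP3.length).dropWhile (fun ch => !(pvSeps.contains ch)))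
    else if PySem.Chars.startswith (c :: rest) pvP1 then
      pvP1 ++ pvRed ++ pvScan (((c :: rest).drop pvP1.length).dropWhile (fun ch => !(pvSeps.contains ch)))
    else if PySem.Chars.startswith (c :: rest) pvP2 then
      pvP2 ++ pvRed ++ pvScan (((c :: rest).drop pvP2.length).dropWhile (fun ch => !(pvSeps.contains ch)))
    else c :: pvScan rest
  termination_by l => l.length
  decreasing_by
    · exact pvScan_dec _ c rest _ (by decide)
    · exact pvScan_dec _ c rest _ (by decide)
    · exact pvScan_dec _ c rest _ (by decide)
    · simp

def redact_postgres_uri_py_alt (value : String) : String :=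
  String.ofList (pvScan value.toList)

-- ===== PRECONDITION & SPEC =====
def Spec_redact_postgres_uri_py (value : String) (out : String) : Prop := out = redact_postgres_uri_py_alt value
instance (value : String) (out : String) : Decidable (Spec_redact_postgres_uri_py value out) := by unfold Spec_redact_postgres_uri_py; infer_instance

-- ===== CLAIM (what is proved, stated in full; the proofs are below) =====
def Claim_equal_redact_postgres_uri_py : Prop := ∀ (value : String), Dom_redact_postgres_uri_py value → Spec_redact_postgres_uri_py value (redact_postgres_uri_py value)

-- ===== LEMMAS AND PROOFS =====

-- ---------- basic notions ----------

-- B's "not a separator" test, named for the proofs (definitionally the lambda in pvScan)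
def pvNS (ch : Char) : Bool := !(pvSeps.contains ch)

def pvP : List (List Char) := [pvP1, pvP2, pvP3]

-- "w is empty or starts with a separator"
def pvSepHead (w : List Char) : Prop := ∀ c wt, w = c :: wt → pvNS c = false

theorem pvP1_pos : 0 < pvP1.length := by decide
theorem pvP2_pos : 0 < pvP2.length := by decide
theorem pvP3_pos : 0 < pvP3.length := by decide
theorem pvP_pos : ∀ q ∈ pvP, 0 < q.length := by decide
theorem pvP_len11 : ∀ q ∈ pvP, 11 ≤ q.length := by decide
theorem pvP_NS : ∀ q ∈ pvP, q.all pvNS = true := by decide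
theorem pvRed_NS : pvRed.all pvNS = true := by decide
theorem pvLt_not_mem : ∀ q ∈ pvP, '<' ∉ q := by decide
theorem pvIncomp : ∀ p ∈ pvP, ∀ q ∈ pvP, q ≠ p → ¬ q <+: p := by decide
theorem pvDec1 : ∀ p ∈ pvP, ∀ q ∈ pvP, ∀ i < p.length + 10, (0 < i ∨ q ≠ p) →
    ¬ q <+: (p ++ pvRed).drop i ∧ ¬ (p ++ pvRed).drop i <+: q := by decide
theorem pvDec2 : ∀ p ∈ pvP, ∀ q ∈ pvP, ∀ i < p.length, (0 < i ∨ q ≠ p) →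
    ¬ q <+: p.drop i ∧ ¬ p.drop i <+: q := by decide

-- ---------- prefix/append toolbox ----------

theorem pvPrefApp {q x w : List Char} (h : q <+: x ++ w) :
    q <+: x ∨ (∃ c wt, w = c :: wt ∧ x.length < q.length ∧ c ∈ q) := by
  by_cases hlen : q.length ≤ x.length
  · left
    have hq := List.prefix_iff_eq_take.mp h
    rw [List.take_append_of_le_length hlen] at hq
    exact hq ▸ List.take_prefix _ _
  · push_neg at hlen
    cases w with
    | nil =>
      exfalso
      have := h.length_le
      simp at this
      omega
    | cons c wt =>
      right
      refine ⟨c, wt, rfl, hlen, ?_⟩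
      have hxx : x.length < (x ++ c :: wt).length := by simp
      have hg := h.getElem (i := x.length) hlen
      rw [List.getElem_append_right (Nat.le_refl _)] at hg
      simp at hg
      rw [← hg]
      exact List.getElem_mem _

theorem pvPrefComp {q x w : List Char} (h : q <+: x ++ w) : q <+: x ∨ x <+: q := by
  rcases pvPrefApp h with h1 | ⟨c, wt, rfl, hlen, _⟩
  · exact Or.inl h1
  · right
    have hq := List.prefix_iff_eq_take.mp h
    have hx : x = q.take x.length := by
      rw [hq, List.take_take, Nat.min_eq_left (Nat.le_of_lt hlen),
        List.take_append_of_le_length (Nat.le_refl _), List.take_length]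
    exact hx ▸ List.take_prefix _ _

theorem pvPrefOfSame {q p z : List Char} (hq : q <+: z) (hp : p <+: z) :
    q <+: p ∨ p <+: q := by
  have h1 := List.prefix_iff_eq_take.mp hq
  have h2 := List.prefix_iff_eq_take.mp hp
  rcases Nat.le_total q.length p.length with hle | hle
  · left
    have h3 : q <+: List.take p.length z := by
      rw [h1]; exact List.take_prefix_take_left hle
    rwa [← h2] at h3
  · right
    have h3 : p <+: List.take q.length z := by
      rw [h2]; exact List.take_prefix_take_left hle
    rwa [← h1] at h3

-- drop i (y ++ w) for i ≤ |y|
theorem pvDropLe {y w : List Char} {i : Nat} (hi : i ≤ y.length) :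
    (y ++ w).drop i = y.drop i ++ w := by
  rw [List.drop_append, Nat.sub_eq_zero_of_le hi, List.drop_zero]

theorem pvDropAt (x z : List Char) (k : Nat) :
    (x ++ z).drop (x.length + k) = z.drop k := by
  rw [List.drop_append]
  simp

-- the '<'/separator blocking lemma: occurrences before position n survive replacing the tail
theorem pvLT {q y rest w : List Char} {n : Nat} (hn : n ≤ y.length)
    (H : ∀ i < n, ¬ q <+: (y ++ rest).drop i)
    (Hw : ∀ c wt, w = c :: wt → c ∉ q) :
    ∀ i < n, ¬ q <+: (y ++ w).drop i := by
  intro i hi hpre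
  have hiy : i ≤ y.length := Nat.le_trans (Nat.le_of_lt hi) hn
  rw [pvDropLe hiy] at hpre
  rcases pvPrefApp hpre with h1 | ⟨c, wt, hw, _, hc⟩
  · exact H i hi (by rw [pvDropLe hiy]; exact h1.trans (List.prefix_append _ _))
  · exact Hw c wt hw hc

-- ---------- find characterization ----------

theorem pvFind_eq_of {s q : List Char} {j : Nat}
    (hocc : q <+: s.drop j) (hmin : ∀ i < j, ¬ q <+: s.drop i) :
    PySem.Chars.find s q = (j : Int) := by
  have hinf : q <:+: s := by
    rw [← PySem.Chars.isIn_iff_infix]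
    exact (PySem.Chars.exists_prefix_drop_iff_isIn q s).mp ⟨j, hocc⟩
  have hnn : 0 ≤ PySem.Chars.find s q := (PySem.Chars.find_nonneg_iff s q).mpr hinf
  obtain ⟨h1, h2⟩ := PySem.Chars.find_spec hnn
  rcases Nat.lt_trichotomy (PySem.Chars.find s q).toNat j with h | h | h
  · exact absurd h1 (hmin _ h)
  · omega
  · exact absurd hocc (h2 j h)

theorem pvFind_neg {s q : List Char} (h : ∀ i, ¬ q <+: s.drop i) :
    PySem.Chars.find s q = -1 := by
  rw [PySem.Chars.find_eq_neg_one_iff]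
  intro hinf
  have := (PySem.Chars.exists_prefix_drop_iff_isIn q s).mpr
    ((PySem.Chars.isIn_iff_infix q s).mpr hinf)
  obtain ⟨j, hj⟩ := this
  exact h j hj

theorem pvFind_zero {q z : List Char} (h : q <+: z) : PySem.Chars.find z q = 0 := by
  have := pvFind_eq_of (s := z) (j := 0) (by simpa using h) (by omega)
  simpa using this

theorem pvFindShift {u w q : List Char} (H : ∀ i < u.length, ¬ q <+: (u ++ w).drop i) :
    PySem.Chars.find (u ++ w) q =
      if PySem.Chars.find w q = -1 then -1 else (u.length : Int) + PySem.Chars.find w q := by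
  split
  case isTrue hw =>
    apply pvFind_neg
    intro i hpre
    by_cases hi : i < u.length
    · exact H i hi hpre
    · push_neg at hi
      have : (u ++ w).drop i = w.drop (i - u.length) := by
        rw [List.drop_append, List.drop_eq_nil_of_le hi, List.nil_append]
      rw [this] at hpre
      rw [PySem.Chars.find_eq_neg_one_iff] at hw
      exact hw ((PySem.Chars.isIn_iff_infix q w).mp
        ((PySem.Chars.exists_prefix_drop_iff_isIn q w).mp ⟨i - u.length, hpre⟩))
  case isFalse hw =>
    have hnn : 0 ≤ PySem.Chars.find w q := by
      have := PySem.Chars.neg_one_le_find w q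
      omega
    obtain ⟨h1, h2⟩ := PySem.Chars.find_spec hnn
    have heq : PySem.Chars.find (u ++ w) q = ((u.length + (PySem.Chars.find w q).toNat : Nat) : Int) := by
      apply pvFind_eq_of
      · rw [pvDropAt]; exact h1
      · intro i hi hpre
        by_cases hiu : i < u.length
        · exact H i hiu hpre
        · push_neg at hiu
          obtain ⟨k, rfl⟩ := Nat.exists_eq_add_of_le hiu
          rw [pvDropAt] at hpre
          exact h2 k (by omega) hpre
    rw [heq]
    push_cast
    rw [Int.toNat_of_nonneg hnn]

-- ---------- the per-prefix pass, in structural form ----------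

-- one A-pass (redact every skipped occurrence of q), recursion on the first occurrence
def pvROne (q : List Char) (hq : 0 < q.length) (v : List Char) : List Char :=
  if PySem.Chars.find v q = -1 then v
  else
    v.take (PySem.Chars.find v q).toNat ++ q ++ pvRed ++
      pvROne q hq ((v.drop ((PySem.Chars.find v q).toNat + q.length)).dropWhile pvNS)
  termination_by v.length
  decreasing_by
    rename_i h
    have hnn : 0 ≤ PySem.Chars.find v q := by
      have := PySem.Chars.neg_one_le_find v q
      omega
    have hocc := (PySem.Chars.find_spec hnn).1
    have h1 := hocc.length_le
    rw [List.length_drop] at h1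
    have h2 := List.length_dropWhile_le pvNS (v.drop ((PySem.Chars.find v q).toNat + q.length))
    rw [List.length_drop] at h2
    omega

theorem pvROne_append {q : List Char} (hq : 0 < q.length) {u w : List Char}
    (H : ∀ i < u.length, ¬ q <+: (u ++ w).drop i) :
    pvROne q hq (u ++ w) = u ++ pvROne q hq w := by
  conv_lhs => rw [pvROne]
  rw [pvFindShift H]
  by_cases hw : PySem.Chars.find w q = -1
  · simp only [hw, if_true, reduceIte]
    conv_rhs => rw [pvROne]
    simp [hw]
  · have hnn : 0 ≤ PySem.Chars.find w q := by
      have := PySem.Chars.neg_one_le_find w q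
      omega
    have hne : ¬ ((u.length : Int) + PySem.Chars.find w q = -1) := by omega
    have htn : ((u.length : Int) + PySem.Chars.find w q).toNat
        = u.length + (PySem.Chars.find w q).toNat := by omega
    have htake : (u ++ w).take (u.length + (PySem.Chars.find w q).toNat)
        = u ++ w.take (PySem.Chars.find w q).toNat := by
      rw [List.take_append]
      simp
    have hdrop : (u ++ w).drop (u.length + (PySem.Chars.find w q).toNat + q.length)
        = w.drop ((PySem.Chars.find w q).toNat + q.length) := by
      rw [Nat.add_assoc, pvDropAt]
    conv_rhs => rw [pvROne]
    simp only [hw, if_false, hne, htn, htake, hdrop]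
    simp [List.append_assoc]

-- ---------- takeWhile/dropWhile over separator-free blocks ----------

theorem pvTakeWhileApp {x : List Char} (hx : x.all pvNS = true) (z : List Char) :
    (x ++ z).takeWhile pvNS = x ++ z.takeWhile pvNS := by
  induction x with
  | nil => simp
  | cons c xt ih =>
    simp only [List.all_cons, Bool.and_eq_true] at hx
    simp [List.takeWhile_cons, hx.1, ih hx.2]

theorem pvDropWhileApp {x : List Char} (hx : x.all pvNS = true) (z : List Char) :
    (x ++ z).dropWhile pvNS = z.dropWhile pvNS := by
  induction x with
  | nil => simp
  | cons c xt ih =>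
    simp only [List.all_cons, Bool.and_eq_true] at hx
    simp [List.dropWhile_cons, hx.1, ih hx.2]

theorem pvDropWhileSepHead {w : List Char} (hw : pvSepHead w) : w.dropWhile pvNS = w := by
  cases w with
  | nil => rfl
  | cons c wt => simp [List.dropWhile_cons, hw c wt rfl]

theorem pvDropWhileAll {x : List Char} (hx : x.all pvNS = true) {w : List Char}
    (hw : pvSepHead w) : (x ++ w).dropWhile pvNS = w := by
  rw [pvDropWhileApp hx, pvDropWhileSepHead hw]

theorem pvSepHead_dropWhile (l : List Char) : pvSepHead (l.dropWhile pvNS) := by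
  induction l with
  | nil => intro c wt h; simp at h
  | cons c lt ih =>
    by_cases hc : pvNS c
    · rw [List.dropWhile_cons_of_pos hc]; exact ih
    · rw [List.dropWhile_cons_of_neg hc]
      intro c' wt h
      cases h
      simpa using hc

-- first occurrence at the head: one unfolding of pvROne
theorem pvROne_head {q : List Char} (hq : 0 < q.length) {z : List Char} (h : q <+: z) :
    pvROne q hq z = q ++ pvRed ++ pvROne q hq ((z.drop q.length).dropWhile pvNS) := by
  rw [pvROne, pvFind_zero h]
  norm_num

-- the collapse pass: the first occurrence of p is right after a, separator-free d is swallowed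
theorem pvCollapse {p : List Char} (hp : 0 < p.length) (hpNS : p.all pvNS = true)
    {a d w : List Char} (hd : d.all pvNS = true) (hw : pvSepHead w)
    (Ha : ∀ i < a.length, ¬ p <+: (a ++ (p ++ (d ++ w))).drop i) :
    pvROne p hp (a ++ (p ++ (d ++ w))) = a ++ (p ++ (pvRed ++ pvROne p hp w)) := by
  rw [pvROne_append hp Ha, pvROne_head hp (List.prefix_append _ _)]
  rw [List.drop_append]
  simp only [Nat.sub_self, List.drop_length, List.drop_zero, List.nil_append]
  rw [pvDropWhileAll hd hw]
  simp [List.append_assoc]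

-- a pass keeps the leading separator (or emptiness) of its input
theorem pvROne_sepHead {q : List Char} (hq : 0 < q.length) (hqNS : q.all pvNS = true)
    {w : List Char} (hw : pvSepHead w) : pvSepHead (pvROne q hq w) := by
  cases w with
  | nil =>
    rw [pvROne]
    have hf : PySem.Chars.find ([] : List Char) q = -1 := by
      apply pvFind_neg
      intro i hpre
      rw [List.drop_nil] at hpre
      have := List.prefix_nil.mp hpre
      subst this
      simp at hq
    simp only [hf, if_true, reduceIte]
    intro c wt h
    simp at h
  | cons c wt =>
    have hc : pvNS c = false := hw c wt rfl
    have hnp : ¬ q <+: (c :: wt) := by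
      intro hpre
      cases q with
      | nil => simp at hq
      | cons q0 qt =>
        obtain ⟨rest, hrest⟩ := hpre
        simp only [List.cons_append] at hrest
        have h0 : q0 = c := ((List.cons.injEq _ _ _ _).mp hrest).1
        have hall : pvNS q0 = true := by
          have := hqNS
          simp only [List.all_cons, Bool.and_eq_true] at this
          exact this.1
        rw [h0, hc] at hall
        exact Bool.false_ne_true hall
    rw [pvROne]
    by_cases hf : PySem.Chars.find (c :: wt) q = -1
    · simp only [hf, if_true, reduceIte]
      exact hw
    · have hnn : 0 ≤ PySem.Chars.find (c :: wt) q := by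
        have := PySem.Chars.neg_one_le_find (c :: wt) q
        omega
      obtain ⟨hocc, hmin⟩ := PySem.Chars.find_spec hnn
      simp only [hf, if_false, reduceIte]
      cases htn : (PySem.Chars.find (c :: wt) q).toNat with
      | zero =>
        rw [htn] at hocc
        simp at hocc
        exact absurd hocc hnp
      | succ t' =>
        intro c' wt' heq
        rw [List.take_succ_cons] at heq
        simp only [List.cons_append] at heq
        injection heq with h1 h2
        rw [← h1]
        exact hc

-- ---------- drop-position helpers on a ++ (p ++ (d ++ w)) ----------

theorem pvDropABm {p : List Char} (a : List Char) {d w : List Char} {i' : Nat} (hi' : i' ≤ p.length) :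
    (a ++ (p ++ (d ++ w))).drop (a.length + i') = p.drop i' ++ (d ++ w) := by
  rw [pvDropAt, pvDropLe hi']

theorem pvDropABd {d : List Char} (a p : List Char) {w : List Char} {k : Nat} (hk : k ≤ d.length) :
    (a ++ (p ++ (d ++ w))).drop (a.length + p.length + k) = d.drop k ++ w := by
  rw [Nat.add_assoc, pvDropAt, pvDropAt, pvDropLe hk]

-- no q-occurrence starts in a, in p, or in the first k₀ characters of d
theorem pvNoOccMid {q p : List Char} (hqP : q ∈ pvP) (hpP : p ∈ pvP) (hne : q ≠ p)
    {a d w : List Char} (hw : pvSepHead w)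
    (Ha : ∀ i < a.length, ¬ q <+: (a ++ (p ++ (d ++ w))).drop i)
    {k₀ : Nat} (hk₀ : k₀ ≤ d.length) (hdmin : ∀ k < k₀, ¬ q <+: d.drop k) :
    ∀ i < a.length + p.length + k₀, ¬ q <+: (a ++ (p ++ (d ++ w))).drop i := by
  have hqNS := pvP_NS q hqP
  intro i hi hpre
  by_cases h1 : i < a.length
  · exact Ha i h1 hpre
  · obtain ⟨j, rfl⟩ := Nat.exists_eq_add_of_le (Nat.not_lt.mp h1)
    by_cases h2 : j < p.length
    · rw [pvDropABm a (Nat.le_of_lt h2)] at hpre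
      rcases pvPrefComp hpre with hcase | hcase
      · exact (pvDec2 p hpP q hqP j h2 (Or.inr hne)).1 hcase
      · exact (pvDec2 p hpP q hqP j h2 (Or.inr hne)).2 hcase
    · obtain ⟨k, rfl⟩ := Nat.exists_eq_add_of_le (Nat.not_lt.mp h2)
      rw [← Nat.add_assoc, pvDropABd a p (by omega)] at hpre
      rcases pvPrefApp hpre with hcase | ⟨c, wt, hwc, _, hcmem⟩
      · exact hdmin k (by omega) hcase
      · have hcf : pvNS c = false := hw c wt hwc
        have hct : pvNS c = true := List.all_eq_true.mp hqNS c hcmem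
        rw [hcf] at hct
        exact Bool.false_ne_true hct

-- ---------- the skip pass: q ≠ p scans over a, p and the separator-free block d ----------

theorem pvSkip {q p : List Char} (hq : 0 < q.length) (hqP : q ∈ pvP) (hpP : p ∈ pvP) (hne : q ≠ p)
    {a d w : List Char} (hd : d.all pvNS = true) (hw : pvSepHead w)
    (Ha : ∀ i < a.length, ¬ q <+: (a ++ (p ++ (d ++ w))).drop i) :
    ∃ d', d'.all pvNS = true ∧
      pvROne q hq (a ++ (p ++ (d ++ w))) = a ++ (p ++ (d' ++ pvROne q hq w)) ∧
      (d' = d ∨ ∃ k, k ≤ d.length ∧ q <+: d.drop k ∧ d' = d.take k ++ (q ++ pvRed)) := by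
  have hqNS := pvP_NS q hqP
  by_cases hocc : ∃ k, k < d.length ∧ q <+: d.drop k
  · -- first occurrence of q inside d
    have hfind : ∀ k, Decidable (k < d.length ∧ q <+: d.drop k) := fun k => inferInstance
    obtain ⟨hk₀lt, hk₀occ⟩ := Nat.find_spec hocc
    have hdmin : ∀ k < Nat.find hocc, ¬ q <+: d.drop k := by
      intro k hk hp
      exact Nat.find_min hocc hk ⟨by omega, hp⟩
    have Hfull := pvNoOccMid hqP hpP hne hw Ha (Nat.le_of_lt hk₀lt) hdmin
    refine ⟨d.take (Nat.find hocc) ++ (q ++ pvRed), ?_, ?_, Or.inr ⟨Nat.find hocc, Nat.le_of_lt hk₀lt, hk₀occ, by simp⟩⟩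
    · have htk : (d.take (Nat.find hocc)).all pvNS = true :=
        List.all_eq_true.mpr (fun x hx => List.all_eq_true.mp hd x (List.mem_of_mem_take hx))
      simp [List.all_append, htk, hqNS, pvRed_NS]
    · have hassoc : a ++ (p ++ (d ++ w)) = (a ++ (p ++ d.take (Nat.find hocc))) ++ (d.drop (Nat.find hocc) ++ w) := by
        simp only [List.append_assoc]
        congr 2
        rw [← List.append_assoc, List.take_append_drop]
      rw [hassoc, pvROne_append hq ?H2]
      · have hpre : q <+: (d.drop (Nat.find hocc) ++ w) := hk₀occ.trans (List.prefix_append _ _)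
        rw [pvROne_head hq hpre]
        have hql : q.length ≤ d.length - Nat.find hocc := by
          have := hk₀occ.length_le
          rwa [List.length_drop] at this
        have hdrop : (d.drop (Nat.find hocc) ++ w).drop q.length
            = (d.drop (Nat.find hocc)).drop q.length ++ w :=
          pvDropLe (by rw [List.length_drop]; exact hql)
        rw [hdrop]
        have hsub : ((d.drop (Nat.find hocc)).drop q.length).all pvNS = true :=
          List.all_eq_true.mpr (fun x hx =>
            List.all_eq_true.mp hd x (List.mem_of_mem_drop (List.mem_of_mem_drop hx)))
        rw [pvDropWhileAll hsub hw]
        simp [List.append_assoc]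
      · intro i hi
        rw [← hassoc]
        apply Hfull
        have : (a ++ (p ++ d.take (Nat.find hocc))).length
            = a.length + (p.length + Nat.find hocc) := by
          simp [Nat.min_eq_left (Nat.le_of_lt hk₀lt)]
        omega
  · -- no occurrence of q inside d
    have hdmin : ∀ k < d.length, ¬ q <+: d.drop k := by
      intro k hk hp
      exact hocc ⟨k, hk, hp⟩
    have Hfull := pvNoOccMid hqP hpP hne hw Ha (Nat.le_refl d.length) hdmin
    refine ⟨d, hd, ?_, Or.inl rfl⟩
    have hassoc : a ++ (p ++ (d ++ w)) = (a ++ (p ++ d)) ++ w := by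
      simp [List.append_assoc]
    rw [hassoc, pvROne_append hq ?H1]
    · simp [List.append_assoc]
    · intro i hi
      rw [← hassoc]
      apply Hfull
      have : (a ++ (p ++ d)).length = a.length + (p.length + d.length) := by simp
      omega

-- ---------- the scan side ----------

theorem pvP1_mem : pvP1 ∈ pvP := by decide
theorem pvP2_mem : pvP2 ∈ pvP := by decide
theorem pvP3_mem : pvP3 ∈ pvP := by decide

theorem pvLam_eq : (fun ch => !(pvSeps.contains ch)) = pvNS := rfl

-- the scan copies a block in which no redactable prefix starts
theorem pvScanCopy : ∀ {u w : List Char},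
    (∀ i < u.length, ∀ q ∈ pvP, ¬ q <+: (u ++ w).drop i) → pvScan (u ++ w) = u ++ pvScan w := by
  intro u
  induction u with
  | nil => intro w _; simp
  | cons c ut ih =>
    intro w H
    have h0 : ∀ q ∈ pvP, ¬ q <+: (c :: (ut ++ w)) := by
      intro q hq
      have := H 0 (by simp) q hq
      simpa using this
    have hsw : ∀ q ∈ pvP, PySem.Chars.startswith (c :: (ut ++ w)) q = false := by
      intro q hq
      rw [Bool.eq_false_iff]
      intro hs
      exact h0 q hq ((PySem.Chars.startswith_iff _ _).mp hs)
    rw [List.cons_append, pvScan,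
      hsw pvP3 pvP3_mem, hsw pvP1 pvP1_mem, hsw pvP2 pvP2_mem]
    simp only [Bool.false_eq_true, if_false, List.cons_append]
    rw [ih ?_]
    intro i hi q hq hpre
    refine H (i + 1) (by simpa using Nat.succ_lt_succ hi) q hq ?_
    simpa using hpre

-- at a position where p ∈ pvP matches, the scan emits p ++ "<redacted>" and skips to the separator
theorem pvScanMatch {p z : List Char} (hp : p ∈ pvP) (h : p <+: z) :
    pvScan z = p ++ (pvRed ++ pvScan ((z.drop p.length).dropWhile pvNS)) := by
  cases z with
  | nil =>
    exfalso
    have h1 := h.length_le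
    have h2 := pvP_pos p hp
    simp only [List.length_nil, Nat.le_zero] at h1
    omega
  | cons c zt =>
    have huniq : ∀ q ∈ pvP, q ≠ p → PySem.Chars.startswith (c :: zt) q = false := by
      intro q hq hne
      rw [Bool.eq_false_iff]
      intro hs
      have hqz := (PySem.Chars.startswith_iff _ _).mp hs
      rcases pvPrefOfSame hqz h with hc | hc
      · exact pvIncomp p hp q hq hne hc
      · exact pvIncomp q hq p hp (Ne.symm hne) hc
    have hpstart : PySem.Chars.startswith (c :: zt) p = true :=
      (PySem.Chars.startswith_iff _ _).mpr h
    have hp' := hp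
    simp only [pvP, List.mem_cons, List.not_mem_nil, or_false] at hp'
    rcases hp' with rfl | rfl | rfl
    · rw [pvScan, pvLam_eq, huniq pvP3 pvP3_mem (by decide), hpstart]
      simp [List.append_assoc]
    · rw [pvScan, pvLam_eq, huniq pvP3 pvP3_mem (by decide), huniq pvP1 pvP1_mem (by decide), hpstart]
      simp [List.append_assoc]
    · rw [pvScan, pvLam_eq, hpstart]
      simp [List.append_assoc]

-- ---------- head-character providers for pvLT ----------

theorem pvHw_red {q : List Char} (hqP : q ∈ pvP) (w : List Char) :
    ∀ c wt, pvRed ++ w = c :: wt → c ∉ q := by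
  intro c wt hcw
  have hred : pvRed = '<' :: ("redacted>".toList) := by decide
  rw [hred, List.cons_append] at hcw
  injection hcw with h1 _
  rw [← h1]
  exact pvLt_not_mem q hqP

theorem pvHw_sep {q : List Char} (hqNS : q.all pvNS = true) {w : List Char} (hw : pvSepHead w) :
    ∀ c wt, w = c :: wt → c ∉ q := by
  intro c wt hcw hc
  have hf := hw c wt hcw
  have ht := List.all_eq_true.mp hqNS c hc
  rw [hf] at ht
  exact Bool.false_ne_true ht

-- no q-occurrence starts in a, after the middle block has been rewritten by a pass
theorem pvHa_d1 {q p : List Char} (hqP : q ∈ pvP)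
    {a c t d1 w1 : List Char}
    (Hbase : ∀ i < a.length, ¬ q <+: (a ++ (p ++ (c ++ t))).drop i)
    (hw1 : pvSepHead w1)
    (hcase : d1 = c ∨ ∃ k, k ≤ c.length ∧ ∃ q', q' ∈ pvP ∧ q' <+: c.drop k ∧ d1 = c.take k ++ (q' ++ pvRed)) :
    ∀ i < a.length, ¬ q <+: (a ++ (p ++ (d1 ++ w1))).drop i := by
  rcases hcase with rfl | ⟨k, hk, q', hq'P, hq'pre, rfl⟩
  · intro i hi hpre
    refine pvLT (q := q) (y := a ++ (p ++ d1)) (rest := t) (w := w1) (n := a.length)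
      (by simp) ?_ (pvHw_sep (pvP_NS q hqP) hw1) i hi ?_
    · intro i' hi' hp'
      exact Hbase i' hi' (by simpa [List.append_assoc] using hp')
    · simpa [List.append_assoc] using hpre
  · obtain ⟨rr, hrr⟩ := hq'pre
    intro i hi hpre
    refine pvLT (q := q) (y := a ++ (p ++ (c.take k ++ q'))) (rest := rr ++ t)
      (w := pvRed ++ w1) (n := a.length) (by simp) ?_ (pvHw_red hqP _) i hi ?_
    · intro i' hi' hp'
      refine Hbase i' hi' ?_
      have hc : c = c.take k ++ (q' ++ rr) := by
        rw [hrr, List.take_append_drop]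
      rw [hc]
      simpa [List.append_assoc] using hp'
    · simpa [List.append_assoc] using hpre

-- the passes with q ≠ p slide over a fully collapsed region a ++ p ++ "<redacted>"
theorem pvAfterCollapse {q p : List Char} (hq : 0 < q.length) (hqP : q ∈ pvP) (hpP : p ∈ pvP)
    (hne : q ≠ p) {a rest w : List Char}
    (Hv : ∀ i < a.length, ¬ q <+: (a ++ (p ++ rest)).drop i) :
    pvROne q hq (a ++ (p ++ (pvRed ++ w))) = a ++ (p ++ (pvRed ++ pvROne q hq w)) := by
  have hassoc : a ++ (p ++ (pvRed ++ w)) = (a ++ (p ++ pvRed)) ++ w := by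
    simp [List.append_assoc]
  rw [hassoc, pvROne_append hq ?_]
  · simp [List.append_assoc]
  · intro i hi
    have hlen : (a ++ (p ++ pvRed)).length = a.length + (p.length + 10) := by
      have : pvRed.length = 10 := by decide
      simp [this]
    rw [← hassoc]
    by_cases h1 : i < a.length
    · intro hpre
      refine pvLT (q := q) (y := a ++ p) (rest := rest) (w := pvRed ++ w) (n := a.length)
        (by simp) ?_ (pvHw_red hqP _) i h1 ?_
      · intro i' hi' hp'
        exact Hv i' hi' (by simpa [List.append_assoc] using hp')
      · simpa [List.append_assoc] using hpre
    · obtain ⟨i', rfl⟩ := Nat.exists_eq_add_of_le (Nat.not_lt.mp h1)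
      intro hpre
      have hi' : i' < p.length + 10 := by omega
      have hdrop : (a ++ (p ++ (pvRed ++ w))).drop (a.length + i')
          = (p ++ pvRed).drop i' ++ w := by
        rw [pvDropAt]
        have : p ++ (pvRed ++ w) = (p ++ pvRed) ++ w := by simp [List.append_assoc]
        rw [this, pvDropLe (by
          have hr : pvRed.length = 10 := by decide
          simp [hr]
          omega)]
      rw [hdrop] at hpre
      rcases pvPrefComp hpre with hc | hc
      · exact (pvDec1 p hpP q hqP i' hi' (Or.inr hne)).1 hc
      · exact (pvDec1 p hpP q hqP i' hi' (Or.inr hne)).2 hc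

-- ---------- the master equivalence of the three passes with the scan ----------

theorem pvChainAux : ∀ n (v : List Char), v.length ≤ n →
    pvROne pvP3 pvP3_pos (pvROne pvP2 pvP2_pos (pvROne pvP1 pvP1_pos v)) = pvScan v := by
  intro n
  induction n with
  | zero =>
    intro v hv
    have hnil : v = [] := List.eq_nil_of_length_eq_zero (by omega)
    subst hnil
    have hid : ∀ (q : List Char) (hq : 0 < q.length), pvROne q hq [] = [] := by
      intro q hq
      rw [pvROne]
      have hf : PySem.Chars.find ([] : List Char) q = -1 := by
        apply pvFind_neg
        intro i hpre
        rw [List.drop_nil] at hpre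
        have := List.prefix_nil.mp hpre
        subst this
        simp at hq
      simp [hf]
    rw [hid, hid, hid, pvScan]
  | succ n ih =>
    intro v hv
    by_cases hocc : ∃ i, ∃ q ∈ pvP, q <+: v.drop i
    · set j := Nat.find hocc with hj
      obtain ⟨p, hpP, hpocc⟩ := Nat.find_spec hocc
      have hjmin : ∀ i < j, ∀ q ∈ pvP, ¬ q <+: v.drop i := by
        intro i hi q hq hpre
        exact Nat.find_min hocc hi ⟨q, hq, hpre⟩
      have hppos := pvP_pos p hpP
      have hjlt : j < v.length := by
        by_contra hge
        rw [List.drop_eq_nil_of_le (Nat.not_lt.mp hge)] at hpocc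
        have := List.prefix_nil.mp hpocc
        subst this
        simp at hppos
      set a := v.take j with ha
      set z₂ := v.drop (j + p.length) with hz₂
      set c := z₂.takeWhile pvNS with hc
      set t := z₂.dropWhile pvNS with ht
      have haLen : a.length = j := by
        rw [ha, List.length_take]
        omega
      have hsplit : p ++ z₂ = v.drop j := by
        obtain ⟨r, hr⟩ := hpocc
        have hrr : r = z₂ := by
          have hdr := congrArg (List.drop p.length) hr
          rw [List.drop_left] at hdr
          rw [hdr, hz₂, List.drop_drop, Nat.add_comm]
        rw [← hrr]
        exact hr
      have hv_decomp : v = a ++ (p ++ (c ++ t)) := by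
        have hct : c ++ t = z₂ := List.takeWhile_append_dropWhile
        rw [hct, hsplit, ha, List.take_append_drop]
      have hcNS : c.all pvNS = true :=
        List.all_eq_true.mpr (fun x hx => List.mem_takeWhile_imp hx)
      have htSep : pvSepHead t := pvSepHead_dropWhile z₂
      have hplen := pvP_len11 p hpP
      have hjp : j + p.length ≤ v.length := by
        have h1 := hpocc.length_le
        rw [List.length_drop] at h1
        omega
      have htlen : t.length ≤ n := by
        have h1 := List.length_dropWhile_le pvNS z₂
        rw [← ht] at h1
        have h2 : z₂.length = v.length - (j + p.length) := by
          rw [hz₂]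
          exact List.length_drop ..
        omega
      have iht := ih t htlen
      have HaQ : ∀ q ∈ pvP, ∀ i < a.length, ¬ q <+: (a ++ (p ++ (c ++ t))).drop i := by
        intro q hq i hi hpre
        rw [← hv_decomp] at hpre
        exact hjmin i (by omega) q hq hpre
      have hscan : pvScan (a ++ (p ++ (c ++ t))) = a ++ (p ++ (pvRed ++ pvScan t)) := by
        rw [pvScanCopy (fun i hi q hq => HaQ q hq i hi)]
        congr 1
        rw [pvScanMatch hpP (List.prefix_append _ _), List.drop_left, pvDropWhileAll hcNS htSep]
      rw [hv_decomp, hscan]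
      have hNS1 := pvP_NS pvP1 pvP1_mem
      have hNS2 := pvP_NS pvP2 pvP2_mem
      have hNS3 := pvP_NS pvP3 pvP3_mem
      have hp' := hpP
      simp only [pvP, List.mem_cons, List.not_mem_nil, or_false] at hp'
      rcases hp' with rfl | rfl | rfl
      · -- p = pvP1 : collapse, then two sliding passes
        rw [pvCollapse pvP1_pos hNS1 hcNS htSep (HaQ pvP1 pvP1_mem),
          pvAfterCollapse pvP2_pos pvP2_mem pvP1_mem (by decide) (HaQ pvP2 pvP2_mem),
          pvAfterCollapse pvP3_pos pvP3_mem pvP1_mem (by decide) (HaQ pvP3 pvP3_mem),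
          ← iht]
      · -- p = pvP2 : skip pass 1, collapse pass 2, slide pass 3
        obtain ⟨d1, hd1NS, hS1, hd1case⟩ :=
          pvSkip pvP1_pos pvP1_mem pvP2_mem (by decide) hcNS htSep (HaQ pvP1 pvP1_mem)
        have hW1sep : pvSepHead (pvROne pvP1 pvP1_pos t) := pvROne_sepHead pvP1_pos hNS1 htSep
        have hd1case' : d1 = c ∨ ∃ k, k ≤ c.length ∧ ∃ q', q' ∈ pvP ∧ q' <+: c.drop k ∧
            d1 = c.take k ++ (q' ++ pvRed) := by
          rcases hd1case with h | ⟨k, hk, hkpre, hkd⟩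
          · exact Or.inl h
          · exact Or.inr ⟨k, hk, pvP1, pvP1_mem, hkpre, hkd⟩
        have Ha2 := pvHa_d1 pvP2_mem (HaQ pvP2 pvP2_mem) hW1sep hd1case'
        rw [hS1, pvCollapse pvP2_pos hNS2 hd1NS hW1sep Ha2,
          pvAfterCollapse pvP3_pos pvP3_mem pvP2_mem (by decide) (HaQ pvP3 pvP3_mem),
          ← iht]
      · -- p = pvP3 : skip passes 1 and 2, collapse pass 3
        obtain ⟨d1, hd1NS, hS1, hd1case⟩ :=
          pvSkip pvP1_pos pvP1_mem pvP3_mem (by decide) hcNS htSep (HaQ pvP1 pvP1_mem)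
        have hW1sep : pvSepHead (pvROne pvP1 pvP1_pos t) := pvROne_sepHead pvP1_pos hNS1 htSep
        have hd1case' : d1 = c ∨ ∃ k, k ≤ c.length ∧ ∃ q', q' ∈ pvP ∧ q' <+: c.drop k ∧
            d1 = c.take k ++ (q' ++ pvRed) := by
          rcases hd1case with h | ⟨k, hk, hkpre, hkd⟩
          · exact Or.inl h
          · exact Or.inr ⟨k, hk, pvP1, pvP1_mem, hkpre, hkd⟩
        have Ha2 := pvHa_d1 pvP2_mem (HaQ pvP2 pvP2_mem) hW1sep hd1case'
        obtain ⟨d2, hd2NS, hS2, hd2case⟩ :=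
          pvSkip pvP2_pos pvP2_mem pvP3_mem (by decide) hd1NS hW1sep Ha2
        have hW2sep : pvSepHead (pvROne pvP2 pvP2_pos (pvROne pvP1 pvP1_pos t)) :=
          pvROne_sepHead pvP2_pos hNS2 hW1sep
        have hd2case' : d2 = d1 ∨ ∃ k, k ≤ d1.length ∧ ∃ q', q' ∈ pvP ∧ q' <+: d1.drop k ∧
            d2 = d1.take k ++ (q' ++ pvRed) := by
          rcases hd2case with h | ⟨k, hk, hkpre, hkd⟩
          · exact Or.inl h
          · exact Or.inr ⟨k, hk, pvP2, pvP2_mem, hkpre, hkd⟩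
        have Hs1 := pvHa_d1 pvP3_mem (HaQ pvP3 pvP3_mem) hW1sep hd1case'
        have Ha3 := pvHa_d1 pvP3_mem Hs1 hW2sep hd2case'
        rw [hS1, hS2, pvCollapse pvP3_pos hNS3 hd2NS hW2sep Ha3, ← iht]
    · -- no occurrence of any prefix: all passes and the scan are the identity
      have hall : ∀ q ∈ pvP, ∀ i, ¬ q <+: v.drop i := by
        intro q hq i hpre
        exact hocc ⟨i, q, hq, hpre⟩
      have hid : ∀ (q : List Char) (hq : 0 < q.length), q ∈ pvP → pvROne q hq v = v := by
        intro q hq hqP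
        rw [pvROne]
        have hf : PySem.Chars.find v q = -1 := pvFind_neg (hall q hqP)
        simp [hf]
      rw [hid pvP1 pvP1_pos pvP1_mem, hid pvP2 pvP2_pos pvP2_mem, hid pvP3 pvP3_pos pvP3_mem]
      have hcopy : pvScan (v ++ []) = v ++ pvScan [] := by
        apply pvScanCopy
        intro i hi q hq hpre
        rw [List.append_nil] at hpre
        exact hall q hq i hpre
      rw [List.append_nil] at hcopy
      rw [hcopy, pvScan, List.append_nil]

-- ---------- characterizing A's end-of-credential computation ----------

theorem pvDropWhile_eq_drop (l : List Char) :
    l.dropWhile pvNS = l.drop ((l.takeWhile pvNS).length) := by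
  induction l with
  | nil => rfl
  | cons ch lt ih =>
    by_cases hch : pvNS ch
    · rw [List.dropWhile_cons_of_pos hch, List.takeWhile_cons_of_pos hch]
      simpa using ih
    · rw [List.dropWhile_cons_of_neg hch, List.takeWhile_cons_of_neg hch]
      rfl

theorem pvPrefixDropSplit {p v : List Char} {j : Nat} (h : p <+: v.drop j) :
    v.drop j = p ++ v.drop (j + p.length) := by
  obtain ⟨r, hr⟩ := h
  have hdr := congrArg (List.drop p.length) hr
  rw [List.drop_left] at hdr
  rw [← hr, hdr, List.drop_drop, Nat.add_comm]

-- elements of the separator-free prefix satisfy pvNS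
theorem pvTakeWhile_getElem {w : List Char} {i : Nat}
    (hi : i < (w.takeWhile pvNS).length) (hw : i < w.length) : pvNS w[i] = true := by
  have hpre : w.takeWhile pvNS <+: w := List.takeWhile_prefix _
  have hg := hpre.getElem hi
  have hmem : w[i] ∈ List.takeWhile pvNS w := hg ▸ List.getElem_mem hi
  exact List.mem_takeWhile_imp hmem

-- single-character occurrence gives the character at that index
theorem pvSingleOcc {w : List Char} {c : Char} {i : Nat} (h : [c] <+: w.drop i)
    (hi : i < w.length) : w[i] = c := by
  obtain ⟨r, hr⟩ := h
  have hd : w.drop i = c :: r := by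
    rw [← hr]
    rfl
  have h2 := List.drop_eq_getElem_cons hi
  rw [hd] at h2
  exact (((List.cons.injEq _ _ _ _).mp h2).1).symm

-- the fold over separators: generic bounds
theorem pvFoldMin_le_init (s : List Char) (k : Int) :
    ∀ (cs : List Char) (e₀ : Int),
      cs.foldl (fun e sep =>
        if PySem.Chars.findFrom s [sep] k ≠ -1
        then min e (PySem.Chars.findFrom s [sep] k) else e) e₀ ≤ e₀ := by
  intro cs
  induction cs with
  | nil => intro e₀; simp
  | cons ch ct ih =>
    intro e₀
    rw [List.foldl_cons]
    refine le_trans (ih _) ?_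
    split
    · exact min_le_left _ _
    · exact le_refl _

theorem pvFoldMin_le_elem (s : List Char) (k : Int) :
    ∀ (cs : List Char) (e₀ : Int) (c : Char), c ∈ cs →
      PySem.Chars.findFrom s [c] k ≠ -1 →
      cs.foldl (fun e sep =>
        if PySem.Chars.findFrom s [sep] k ≠ -1
        then min e (PySem.Chars.findFrom s [sep] k) else e) e₀
        ≤ PySem.Chars.findFrom s [c] k := by
  intro cs
  induction cs with
  | nil => intro e₀ c hc; simp at hc
  | cons ch ct ih =>
    intro e₀ c hc hne
    rw [List.foldl_cons]
    rcases List.mem_cons.mp hc with rfl | hc'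
    · refine le_trans (pvFoldMin_le_init s k ct _) ?_
      rw [if_pos hne]
      exact min_le_right _ _
    · exact ih _ c hc' hne

theorem pvFoldMin_ge (s : List Char) (k : Int) (m : Int) :
    ∀ (cs : List Char) (e₀ : Int), m ≤ e₀ →
      (∀ c ∈ cs, PySem.Chars.findFrom s [c] k ≠ -1 → m ≤ PySem.Chars.findFrom s [c] k) →
      m ≤ cs.foldl (fun e sep =>
        if PySem.Chars.findFrom s [sep] k ≠ -1
        then min e (PySem.Chars.findFrom s [sep] k) else e) e₀ := by
  intro cs
  induction cs with
  | nil => intro e₀ h₀ _; simpa using h₀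
  | cons ch ct ih =>
    intro e₀ h₀ hcs
    rw [List.foldl_cons]
    refine ih _ ?_ (fun c hc => hcs c (List.mem_cons_of_mem _ hc))
    split
    · exact le_min h₀ (hcs ch (List.mem_cons_self ..) (by assumption))
    · exact h₀

-- the fold computes (the index of) the first separator at or after k
theorem pvEnd_eq (s : List Char) (k : Nat) (hk : k ≤ s.length) :
    pvSeps.foldl (fun e sep =>
      if PySem.Chars.findFrom s [sep] (k : Int) ≠ -1
      then min e (PySem.Chars.findFrom s [sep] (k : Int)) else e) ((s.length : Int))
      = ((k + ((s.drop k).takeWhile pvNS).length : Nat) : Int) := by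
  set w := s.drop k with hw
  set T := (w.takeWhile pvNS).length with hT
  have hwlen : w.length = s.length - k := by rw [hw]; exact List.length_drop ..
  have hTle : T ≤ w.length := by
    rw [hT]
    exact (List.takeWhile_prefix _).length_le
  have hfindchar : ∀ c : Char, pvNS c = false →
      PySem.Chars.findFrom s [c] (k : Int) ≠ -1 →
      PySem.Chars.findFrom s [c] (k : Int) = (k : Int) + PySem.Chars.find w [c] ∧
        (T : Int) ≤ PySem.Chars.find w [c] := by
    intro c hcF hne
    rw [PySem.Chars.findFrom_natCast s [c] k hk, ← hw] at hne ⊢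
    by_cases hf : PySem.Chars.find w [c] = -1
    · simp [hf] at hne
    · have hnn : 0 ≤ PySem.Chars.find w [c] := by
        have := PySem.Chars.neg_one_le_find w [c]
        omega
      refine ⟨by simp [hf], ?_⟩
      by_contra hlt
      push_neg at hlt
      have hfT : (PySem.Chars.find w [c]).toNat < T := by omega
      have hocc := (PySem.Chars.find_spec hnn).1
      have hlen : (PySem.Chars.find w [c]).toNat < w.length := by omega
      have hchar := pvSingleOcc hocc hlen
      have := pvTakeWhile_getElem (w := w) (i := (PySem.Chars.find w [c]).toNat) (by omega) hlen
      rw [hchar, hcF] at this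
      exact Bool.false_ne_true this
  apply le_antisymm
  · by_cases hTw : T = w.length
    · refine le_trans (pvFoldMin_le_init s k pvSeps _) ?_
      omega
    · have hTlt : T < w.length := by omega
      have hdw : w.dropWhile pvNS = w.drop T := pvDropWhile_eq_drop w
      have hne : w.drop T ≠ [] := by
        intro hnil
        have hlen : (w.drop T).length = w.length - T := List.length_drop ..
        rw [hnil] at hlen
        simp at hlen
        omega
      obtain ⟨c₀, t0, hct⟩ := List.exists_cons_of_ne_nil hne
      have hsh := pvSepHead_dropWhile w
      rw [hdw, hct] at hsh
      have hc₀F : pvNS c₀ = false := hsh c₀ t0 rfl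
      have hc₀mem : c₀ ∈ pvSeps := by
        have hcon : pvSeps.contains c₀ = true := by
          rw [pvNS] at hc₀F
          simpa using hc₀F
        exact List.mem_of_elem_eq_true hcon
      have hocc : [c₀] <+: w.drop T := by
        rw [hct]
        exact ⟨t0, rfl⟩
      have hinf : 0 ≤ PySem.Chars.find w [c₀] := by
        rw [PySem.Chars.find_nonneg_iff, ← PySem.Chars.isIn_iff_infix]
        exact (PySem.Chars.exists_prefix_drop_iff_isIn [c₀] w).mp ⟨T, hocc⟩
      have hfle : (PySem.Chars.find w [c₀]).toNat ≤ T := by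
        by_contra hgt
        push_neg at hgt
        exact (PySem.Chars.find_spec hinf).2 T hgt hocc
      have hf : PySem.Chars.find w [c₀] ≠ -1 := by omega
      have hffrom : PySem.Chars.findFrom s [c₀] (k : Int)
          = (k : Int) + PySem.Chars.find w [c₀] := by
        rw [PySem.Chars.findFrom_natCast s [c₀] k hk, ← hw]
        simp [hf]
      have hnemain : PySem.Chars.findFrom s [c₀] (k : Int) ≠ -1 := by
        rw [hffrom]
        omega
      refine le_trans (pvFoldMin_le_elem s k pvSeps _ c₀ hc₀mem hnemain) ?_
      rw [hffrom]
      omega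
  · apply pvFoldMin_ge
    · omega
    · intro c hc hne
      have hcF : pvNS c = false := by
        have hcon : pvSeps.contains c = true := List.elem_eq_true_of_mem hc
        unfold pvNS
        rw [hcon]
        rfl
      obtain ⟨heq, hge⟩ := hfindchar c hcF hne
      rw [heq]
      omega

-- ---------- bridging A's indexed while-loop to the structural pass ----------

def pvEndE (s : List Char) (start : Int) : Int :=
  pvSeps.foldl (fun e sep =>
    let cand := PySem.Chars.findFrom s [sep] start
    if cand ≠ -1 then min e cand else e) ((s.length : Int))

theorem pvLoopA_step (p : List Char) (fuel : Nat) (red : List Char) (start : Int)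
    (h : ¬ start = -1) :
    pvLoopA p (fuel + 1) red start =
      pvLoopA p fuel
        (PySem.Chars.slice red none (some start) ++ p ++ pvRed ++
          PySem.Chars.slice red (some (pvEndE red start)) none)
        (PySem.Chars.findFrom
          (PySem.Chars.slice red none (some start) ++ p ++ pvRed ++
            PySem.Chars.slice red (some (pvEndE red start)) none) p
          (start + (p.length : Int) + (pvRed.length : Int))) := by
  rw [pvLoopA, if_neg h]
  rfl

theorem pvEndE_eq (s : List Char) (k : Nat) (hk : k ≤ s.length) :
    pvEndE s (k : Int) = ((k + ((s.drop k).takeWhile pvNS).length : Nat) : Int) :=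
  pvEnd_eq s k hk

theorem pvLoop_eq (p : List Char) (hp : 0 < p.length) (hp11 : 11 ≤ p.length)
    (hpNS : p.all pvNS = true) :
    ∀ (fuel : Nat) (u v : List Char) (start : Int),
      start = (if PySem.Chars.find v p = -1 then -1
               else (u.length : Int) + PySem.Chars.find v p) →
      v.length + 11 ≤ 11 * fuel →
      pvLoopA p fuel (u ++ v) start = u ++ pvROne p hp v := by
  intro fuel
  induction fuel with
  | zero =>
    intro u v start _ hf
    omega
  | succ fuel ih =>
    intro u v start hstart hfuel
    by_cases hfv : PySem.Chars.find v p = -1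
    · rw [hstart, if_pos hfv, pvLoopA]
      simp only [reduceIte]
      rw [pvROne, hfv]
      simp
    · have hnn : 0 ≤ PySem.Chars.find v p := by
        have := PySem.Chars.neg_one_le_find v p
        omega
      set jn := (PySem.Chars.find v p).toNat with hjn
      have hjv : PySem.Chars.find v p = (jn : Int) := by omega
      obtain ⟨hoccj, hminj⟩ := PySem.Chars.find_spec hnn
      rw [← hjn] at hoccj hminj
      have hjle : jn + p.length ≤ v.length := by
        have h1 := hoccj.length_le
        rw [List.length_drop] at h1
        have h2 := PySem.Chars.find_le_length v p
        omega
      have hcast : (u.length : Int) + (jn : Int) = ((u.length + jn : Nat) : Int) := by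
        push_cast
        ring
      rw [hstart, if_neg hfv, hjv, hcast,
        pvLoopA_step p fuel (u ++ v) _ (by push_cast; omega)]
      have hkle : u.length + jn ≤ (u ++ v).length := by
        rw [List.length_append]
        omega
      have hdropk : (u ++ v).drop (u.length + jn) = v.drop jn := pvDropAt u v jn
      have hsplitj : v.drop jn = p ++ v.drop (jn + p.length) := pvPrefixDropSplit hoccj
      have hT : ((u ++ v).drop (u.length + jn)).takeWhile pvNS
          = p ++ (v.drop (jn + p.length)).takeWhile pvNS := by
        rw [hdropk, hsplitj, pvTakeWhileApp hpNS]
      set T' := ((v.drop (jn + p.length)).takeWhile pvNS).length with hT'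
      set w' := (v.drop (jn + p.length)).dropWhile pvNS with hw'
      have hE : pvEndE (u ++ v) ((u.length + jn : Nat) : Int)
          = ((u.length + jn + (p.length + T') : Nat) : Int) := by
        rw [pvEndE_eq (u ++ v) (u.length + jn) hkle, hT]
        simp [hT']
      have hslice1 : PySem.Chars.slice (u ++ v) none (some ((u.length + jn : Nat) : Int))
          = u ++ v.take jn := by
        rw [PySem.Chars.slice_eq_listSlice, PySem.List.slice_to _ (by positivity),
          Int.toNat_natCast, List.take_append]
        simp
      have hslice2 : PySem.Chars.slice (u ++ v)
            (some (pvEndE (u ++ v) ((u.length + jn : Nat) : Int))) none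
          = w' := by
        rw [hE, PySem.Chars.slice_eq_listSlice, PySem.List.slice_from _ (by positivity),
          Int.toNat_natCast]
        have h1 : u.length + jn + (p.length + T') = u.length + (jn + p.length + T') := by
          omega
        rw [h1, pvDropAt, hw', pvDropWhile_eq_drop, ← hT', List.drop_drop, Nat.add_comm]
      rw [hslice1, hslice2]
      -- the new string is u' ++ w'
      have hjnv : jn ≤ v.length := by omega
      have hlenu' : (u ++ v.take jn ++ p ++ pvRed).length = u.length + jn + p.length + 10 := by
        have hred : pvRed.length = 10 := by decide
        simp [hred, List.length_take]
        omega
      have hassoc : u ++ v.take jn ++ p ++ pvRed ++ w' = (u ++ v.take jn ++ p ++ pvRed) ++ w' := by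
        simp [List.append_assoc]
      have hbase : ((u.length + jn : Nat) : Int) + (p.length : Int) + (pvRed.length : Int)
          = (((u ++ v.take jn ++ p ++ pvRed).length : Nat) : Int) := by
        have hred : pvRed.length = 10 := by decide
        rw [hlenu', hred]
        push_cast
        ring
      rw [hbase, hassoc,
        PySem.Chars.findFrom_natCast _ p _ (by simp only [List.length_append]; omega)]
      rw [List.drop_left]
      · rw [ih (u ++ v.take jn ++ p ++ pvRed) w' _ rfl ?_]
        · conv_rhs => rw [pvROne]
          rw [if_neg hfv, ← hjn, hw']
          simp [List.append_assoc]
        · have h1 := List.length_dropWhile_le pvNS (v.drop (jn + p.length))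
          rw [← hw'] at h1
          rw [List.length_drop] at h1
          omega

theorem pvPass_eq (p : List Char) (hp : 0 < p.length) (h11 : 11 ≤ p.length)
    (hNS : p.all pvNS = true) (red : List Char) :
    pvLoopA p (red.length + 1) red (PySem.Chars.find red p) = pvROne p hp red := by
  have h := pvLoop_eq p hp h11 hNS (red.length + 1) [] red (PySem.Chars.find red p)
    (by by_cases hf : PySem.Chars.find red p = -1 <;> simp [hf]) (by omega)
  simpa using h

-- ===== VERDICT (by name: the statement is the Claim_ definition above) =====
theorem redact_postgres_uri_py_spec : Claim_equal_redact_postgres_uri_py := by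
  intro value _
  show redact_postgres_uri_py value = redact_postgres_uri_py_alt value
  unfold redact_postgres_uri_py redact_postgres_uri_py_alt
  congr 1
  simp only [List.foldl_cons, List.foldl_nil]
  rw [pvPass_eq pvP1 pvP1_pos (by decide) (pvP_NS _ pvP1_mem),
    pvPass_eq pvP2 pvP2_pos (by decide) (pvP_NS _ pvP2_mem),
    pvPass_eq pvP3 pvP3_pos (by decide) (pvP_NS _ pvP3_mem)]
  exact pvChainAux value.toList.length value.toList (Nat.le_refl _)
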